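-- pv_equiv track=rewrite | github.com/Delingerb/bontar_discord_bot | flvl_calculator.py | calculate_experience
-- ===== SOURCE A (Python) =====
-- def calculate_experience(current_lvl, desired_lvl):
--     total_experience = 0
--
--     if current_lvl >= desired_lvl:
--         message = "Warning: The current level must be lower than the desired level."
--         return message
--
--     for level in range(current_lvl, desired_lvl):
--         level_experience = 50 * level ** 2 - 150 * level + 200
--         total_experience += level_experience
--
--     formatted_experience = "{:,}".format(total_experience)
--     message = f"To level up from {current_lvl} to {desired_lvl}, you need {formatted_experience} experience points."
--     return message
-- ===== SOURCE B (Python) =====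
-- def calculate_experience(current_lvl, desired_lvl):
--     if current_lvl >= desired_lvl:
--         return "Warning: The current level must be lower than the desired level."
--     n = desired_lvl - current_lvl
--     c = current_lvl
--     sum1 = n * c + n * (n - 1) // 2
--     sum2 = n * c * c + c * (n * (n - 1)) + (n - 1) * n * (2 * n - 1) // 6
--     total = 50 * sum2 - 150 * sum1 + 200 * n
--     return f"To level up from {current_lvl} to {desired_lvl}, you need {total:,} experience points."
-- ===== Notes on version B (the rewrite author's own statement) =====
-- stated objective: faster
-- what changed: B replaces A's per-level loop summing 50*l^2-150*l+200 with the closed-form Gauss and sum-of-squares formulas, computing the total in O(1).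
import Mathlib
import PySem

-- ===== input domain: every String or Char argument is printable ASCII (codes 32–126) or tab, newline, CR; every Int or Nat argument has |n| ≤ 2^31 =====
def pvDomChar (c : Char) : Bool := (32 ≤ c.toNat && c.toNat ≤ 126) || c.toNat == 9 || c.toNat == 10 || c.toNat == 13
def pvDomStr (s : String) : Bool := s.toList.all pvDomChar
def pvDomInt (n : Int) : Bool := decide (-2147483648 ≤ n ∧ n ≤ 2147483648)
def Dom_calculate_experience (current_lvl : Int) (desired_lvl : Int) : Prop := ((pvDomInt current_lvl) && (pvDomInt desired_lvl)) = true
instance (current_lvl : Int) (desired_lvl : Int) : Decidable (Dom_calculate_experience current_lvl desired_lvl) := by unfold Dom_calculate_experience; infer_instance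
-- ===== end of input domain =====

-- B replaces A's O(n) level loop by the closed-form Gauss/sum-of-squares formulas (O(1)).

-- "{:,}".format(n) for an integer n: decimal digits grouped in threes from the right.
-- Exact hand port (PySem has no comma formatting): works on the reversed digit list.
def pvGroup3 : List Char → List Char
  | a :: b :: c :: d :: rest => a :: b :: c :: ',' :: pvGroup3 (d :: rest)
  | l => l

def pvCommaFormat (n : Int) : String :=
  match PySem.Int.toChars n with
  | '-' :: rest => String.ofList ('-' :: (pvGroup3 rest.reverse).reverse)
  | cs => String.ofList ((pvGroup3 cs.reverse).reverse)

-- ===== PORT A =====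
def calculate_experience (current_lvl : Int) (desired_lvl : Int) : String :=
  if current_lvl ≥ desired_lvl then
    "Warning: The current level must be lower than the desired level."
  else
    let total_experience :=
      (PySem.List.pyRange current_lvl desired_lvl 1).foldl
        (fun acc level => acc + (50 * level ^ 2 - 150 * level + 200)) 0
    "To level up from " ++ PySem.Int.toStr current_lvl ++ " to " ++
      PySem.Int.toStr desired_lvl ++ ", you need " ++ pvCommaFormat total_experience ++
      " experience points."

-- ===== PORT B =====
def calculate_experience_alt (current_lvl : Int) (desired_lvl : Int) : String :=
  if current_lvl ≥ desired_lvl then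
    "Warning: The current level must be lower than the desired level."
  else
    let n := desired_lvl - current_lvl
    let c := current_lvl
    let sum1 := n * c + PySem.Int.floordiv (n * (n - 1)) 2
    let sum2 := n * c * c + c * (n * (n - 1)) +
      PySem.Int.floordiv ((n - 1) * n * (2 * n - 1)) 6
    let total := 50 * sum2 - 150 * sum1 + 200 * n
    "To level up from " ++ PySem.Int.toStr current_lvl ++ " to " ++
      PySem.Int.toStr desired_lvl ++ ", you need " ++ pvCommaFormat total ++
      " experience points."

-- ===== PRECONDITION & SPEC =====
def Spec_calculate_experience (current_lvl : Int) (desired_lvl : Int) (out : String) : Prop := out = calculate_experience_alt current_lvl desired_lvl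
instance (current_lvl : Int) (desired_lvl : Int) (out : String) : Decidable (Spec_calculate_experience current_lvl desired_lvl out) := by unfold Spec_calculate_experience; infer_instance

-- ===== CLAIM (what is proved, stated in full; the proofs are below) =====
def Claim_equal_calculate_experience : Prop := ∀ (current_lvl : Int) (desired_lvl : Int), Dom_calculate_experience current_lvl desired_lvl → Spec_calculate_experience current_lvl desired_lvl (calculate_experience current_lvl desired_lvl)

-- ===== LEMMAS AND PROOFS =====

-- closed form of B's total, as a function of c and the (Nat) number of levels
def pvClosed (c : Int) (n : Nat) : Int :=
  50 * ((n : Int) * c * c + c * ((n : Int) * ((n : Int) - 1)) +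
        Int.fdiv (((n : Int) - 1) * (n : Int) * (2 * (n : Int) - 1)) 6)
  - 150 * ((n : Int) * c + Int.fdiv ((n : Int) * ((n : Int) - 1)) 2)
  + 200 * (n : Int)

lemma pvFoldl_eq_closed (c : Int) (n : Nat) :
    ((List.range n).map (fun (k : Nat) => c + (k : Int))).foldl
      (fun acc l => acc + (50 * l ^ 2 - 150 * l + 200)) 0 = pvClosed c n := by
  induction n with
  | zero => simp [pvClosed]
  | succ m ih =>
    rw [List.range_succ, List.map_append, List.foldl_append, ih]
    have h2 : Int.fdiv (((m : Int) + 1) * ((m : Int) + 1 - 1)) 2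
        = Int.fdiv ((m : Int) * ((m : Int) - 1)) 2 + (m : Int) := by
      rw [show ((m : Int) + 1) * ((m : Int) + 1 - 1)
            = (m : Int) * ((m : Int) - 1) + (m : Int) * 2 by ring]
      exact Int.add_mul_fdiv_right _ _ two_ne_zero
    have h6 : Int.fdiv (((m : Int) + 1 - 1) * ((m : Int) + 1) * (2 * ((m : Int) + 1) - 1)) 6
        = Int.fdiv (((m : Int) - 1) * (m : Int) * (2 * (m : Int) - 1)) 6 + (m : Int) * (m : Int) := by
      rw [show ((m : Int) + 1 - 1) * ((m : Int) + 1) * (2 * ((m : Int) + 1) - 1)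
            = ((m : Int) - 1) * (m : Int) * (2 * (m : Int) - 1) + ((m : Int) * (m : Int)) * 6 by ring]
      exact Int.add_mul_fdiv_right _ _ (by norm_num)
    simp only [List.map_cons, List.map_nil, List.foldl_cons, List.foldl_nil, pvClosed,
      Nat.cast_add, Nat.cast_one, h2, h6]
    ring

-- ===== VERDICT (by name: the statement is the Claim_ definition above) =====
theorem calculate_experience_spec : Claim_equal_calculate_experience := by
  intro c d _
  unfold Spec_calculate_experience calculate_experience calculate_experience_alt
  by_cases h : c ≥ d
  · simp [h]
  · simp only [h, if_false]
    have hlt : c < d := lt_of_not_ge h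
    have hn : ((d - c).toNat : Int) = d - c := Int.toNat_of_nonneg (by omega)
    have := pvFoldl_eq_closed c (d - c).toNat
    rw [PySem.List.pyRange_one, this]
    unfold pvClosed
    rw [hn]
    simp [PySem.Int.floordiv]
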